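-- pv_equiv track=rewrite | github.com/gklevans/consumer-problem | webapp.py | convert_to_mathml
-- ===== SOURCE A (Python) =====
-- def convert_to_mathml(html: str) -> str:
--     """
--
--
--     Parameters
--     ----------
--     html : str
--         HTML that includes the Python parameters 'a', 'p', 'px', 'py', 'm'.
--
--     Returns
--     -------
--     str
--         The same HTML with the parameters mentioned above converted to MathML.
--
--     """
--
--     MATHML_DICT = {
--         "'a'": """<math><mi>a</mi></math>""",
--         "'p'": "<math><mi>&rho;</mi></math>",
--         "'m'": "<math><mi>m</mi></math>",
--         "'px'": """<math>
--                         <msub>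
--                             <mi>p</mi>
--                             <mi>x</mi>
--                         </msub>
--                     </math>""",
--         "'py'": """<math>
--                         <msub>
--                             <mi>p</mi>
--                             <mi>y</mi>
--                         </msub>
--                     </math>""",
--         "'m'": "<math><mi>m</mi></math>",
--         }
--
--     for key, value in MATHML_DICT.items():
--         html = html.replace(key, value)
--
--     return html
-- ===== SOURCE B (Python) =====
-- def convert_to_mathml(html: str) -> str:
--     """Single left-to-right scan replacing each parameter token in place
--     (instead of five sequential full-string str.replace passes)."""
--
--     MATHML_DICT = {
--         "'a'": """<math><mi>a</mi></math>""",
--         "'p'": "<math><mi>&rho;</mi></math>",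
--         "'m'": "<math><mi>m</mi></math>",
--         "'px'": """<math>
--                         <msub>
--                             <mi>p</mi>
--                             <mi>x</mi>
--                         </msub>
--                     </math>""",
--         "'py'": """<math>
--                         <msub>
--                             <mi>p</mi>
--                             <mi>y</mi>
--                         </msub>
--                     </math>""",
--         }
--
--     KEYS = ("'px'", "'py'", "'a'", "'p'", "'m'")  # longest first
--     out = []
--     i = 0
--     n = len(html)
--     while i < n:
--         if html[i] == "'":
--             for key in KEYS:
--                 if html.startswith(key, i):
--                     out.append(MATHML_DICT[key])
--                     i += len(key)
--                     break
--             else: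
--                 out.append(html[i])
--                 i += 1
--         else:
--             out.append(html[i])
--             i += 1
--     return ''.join(out)
-- ===== Notes on version B (the rewrite author's own statement) =====
-- stated objective: alternative
-- what changed: B replaces A's five sequential full-string str.replace passes by a single left-to-right scan that, at each quote character, matches the parameter token (longest first) and emits its MathML value, building the output once.
-- outside the precondition, e.g. on convert_to_mathml("'p'a'"): A returns "'p<math><mi>a</mi></math>", B returns "<math><mi>&rho;</mi></math>a'"
import Mathlib
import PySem

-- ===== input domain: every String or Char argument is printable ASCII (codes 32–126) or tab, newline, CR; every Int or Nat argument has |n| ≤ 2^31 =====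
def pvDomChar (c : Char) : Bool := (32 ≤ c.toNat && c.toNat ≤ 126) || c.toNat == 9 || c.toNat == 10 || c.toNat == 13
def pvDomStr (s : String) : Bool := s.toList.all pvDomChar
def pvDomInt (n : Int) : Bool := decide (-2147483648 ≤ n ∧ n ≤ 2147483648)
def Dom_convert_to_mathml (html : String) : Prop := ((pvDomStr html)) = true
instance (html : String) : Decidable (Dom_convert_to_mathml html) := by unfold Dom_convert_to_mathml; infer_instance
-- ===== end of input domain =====

-- B replaces A's five sequential full-string str.replace passes by one left-to-right scan
-- that substitutes each parameter token where it is found (objective: alternative single-pass algorithm).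

-- the MathML replacement strings (shared constants of both ports)
def pvVA : String := "<math><mi>a</mi></math>"
def pvVP : String := "<math><mi>&rho;</mi></math>"
def pvVM : String := "<math><mi>m</mi></math>"
def pvVPX : String := "<math>\n                        <msub>\n                            <mi>p</mi>\n                            <mi>x</mi>\n                        </msub>\n                    </math>"
def pvVPY : String := "<math>\n                        <msub>\n                            <mi>p</mi>\n                            <mi>y</mi>\n                        </msub>\n                    </math>"

-- ===== PORT A =====
-- A's dict literal (the duplicate "'m'" entry overwrites in place, as in Python)
def mathmlDict : PySem.Dict String String :=
  ((((((PySem.Dict.empty).insert "'a'" pvVA).insert "'p'" pvVP).insert "'m'" pvVM).insert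
      "'px'" pvVPX).insert "'py'" pvVPY).insert "'m'" pvVM

-- for key, value in MATHML_DICT.items(): html = html.replace(key, value)
def convert_to_mathml (html : String) : String :=
  mathmlDict.items.foldl (fun h kv => PySem.Str.replace h kv.1 kv.2) html

-- ===== PORT B =====
-- Source B's single scan: at a quote try the keys (longest first: 'px','py','a','p','m'),
-- emit the mapped value and skip the token, else emit the character.
def scanB : List Char → List Char
  | [] => []
  | c :: t =>
    if c = '\'' then
      if List.isPrefixOf "'px'".toList (c :: t) then pvVPX.toList ++ scanB (t.drop 3)
      else if List.isPrefixOf "'py'".toList (c :: t) then pvVPY.toList ++ scanB (t.drop 3)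
      else if List.isPrefixOf "'a'".toList (c :: t) then pvVA.toList ++ scanB (t.drop 2)
      else if List.isPrefixOf "'p'".toList (c :: t) then pvVP.toList ++ scanB (t.drop 2)
      else if List.isPrefixOf "'m'".toList (c :: t) then pvVM.toList ++ scanB (t.drop 2)
      else c :: scanB t
    else c :: scanB t
termination_by l => l.length
decreasing_by all_goals simp

def convert_to_mathml_alt (html : String) : String := String.ofList (scanB html.toList)

-- ===== PRECONDITION & SPEC =====
-- Pre_ excludes inputs with two overlapping parameter tokens (sharing a quote character) in which
-- the token A's fixed dict order replaces first is not the leftmost one; there the winning token is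
-- an artefact of A's replacement order and either choice is defensible.
def pvBadLits : List String :=
  ["'p'a'", "'m'a'", "'m'p'", "'px'a'", "'px'p'", "'px'm'", "'py'a'", "'py'p'", "'py'm'", "'py'px'"]

def Pre_convert_to_mathml (html : String) : Prop :=
  ∀ b ∈ pvBadLits, PySem.Str.isIn b html = false
instance (html : String) : Decidable (Pre_convert_to_mathml html) := by
  unfold Pre_convert_to_mathml; infer_instance

def pvWitness_convert_to_mathml : String := "total 'p' = 'px' + 'py'"

def Spec_convert_to_mathml (html : String) (out : String) : Prop := out = convert_to_mathml_alt html
instance (html : String) (out : String) : Decidable (Spec_convert_to_mathml html out) := by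
  unfold Spec_convert_to_mathml; infer_instance

-- ===== CLAIM (what is proved, stated in full; the proofs are below) =====
def Claim_equal_convert_to_mathml : Prop :=
  ∀ (html : String), Dom_convert_to_mathml html → Pre_convert_to_mathml html →
    Spec_convert_to_mathml html (convert_to_mathml html)

-- ===== LEMMAS AND PROOFS =====

-- one replace pass for a single (nonempty) key, in direct structural form
def rep (old new : List Char) : List Char → List Char
  | [] => []
  | c :: t =>
    if List.isPrefixOf old (c :: t) then new ++ rep old new (t.drop (old.length - 1))
    else c :: rep old new t
termination_by l => l.length
decreasing_by all_goals simp

theorem rep_nil (old new : List Char) : rep old new [] = [] := by rw [rep]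

theorem rep_cons_neg (old new : List Char) (c : Char) (t : List Char) (h : ¬ old <+: (c :: t)) :
    rep old new (c :: t) = c :: rep old new t := by
  rw [rep, if_neg (by simpa [List.isPrefixOf_iff_prefix] using h)]

theorem rep_key (o' new u : List Char) :
    rep ('\'' :: o') new (('\'' :: o') ++ u) = new ++ rep ('\'' :: o') new u := by
  rw [List.cons_append, rep, if_pos (by simp [List.isPrefixOf_iff_prefix])]
  simp

theorem go_eq (old new : List Char) (hne : old ≠ []) :
    ∀ fuel l acc, l.length ≤ fuel →
      PySem.Chars.replace.go old new fuel l acc = acc.reverse ++ rep old new l := by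
  have hol : 1 ≤ old.length := by
    cases old with | nil => exact absurd rfl hne | cons a b => simp
  intro fuel
  induction fuel with
  | zero =>
    intro l acc h
    have : l = [] := List.eq_nil_of_length_eq_zero (Nat.le_zero.mp h)
    subst this
    rw [PySem.Chars.replace.go.eq_def]
    simp [rep_nil]
  | succ n ih =>
    intro l acc h
    match l with
    | [] => rw [PySem.Chars.replace.go.eq_def]; simp [rep_nil]
    | c :: t =>
      have hlt : t.length ≤ n := by simpa using h
      rw [PySem.Chars.replace.go.eq_def]
      by_cases hp : old.isPrefixOf (c :: t)
      · simp only [hp, if_true]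
        have hdrop : List.drop old.length (c :: t) = t.drop (old.length - 1) := by
          cases old with
          | nil => exact absurd rfl hne
          | cons a b => simp
        have hlen : (List.drop old.length (c :: t)).length ≤ n := by simp; omega
        rw [ih _ _ hlen, hdrop]
        rw [rep, if_pos hp]
        simp
      · simp only [hp]
        rw [ih _ _ hlt]
        rw [rep_cons_neg _ _ _ _ (by simpa [List.isPrefixOf_iff_prefix] using hp)]
        simp

theorem replace_eq_rep (s old new : List Char) (h : old ≠ []) :
    PySem.Chars.replace s old new = rep old new s := by
  unfold PySem.Chars.replace
  rw [if_neg (by simp [h])]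
  simpa using go_eq old new h s.length s [] le_rfl

-- A's composition, on the character-list side
def Flist (cs : List Char) : List Char :=
  rep "'py'".toList pvVPY.toList
    (rep "'px'".toList pvVPX.toList
      (rep "'m'".toList pvVM.toList
        (rep "'p'".toList pvVP.toList
          (rep "'a'".toList pvVA.toList cs))))

theorem items_dict :
    mathmlDict.items = [("'a'", pvVA), ("'p'", pvVP), ("'m'", pvVM), ("'px'", pvVPX), ("'py'", pvVPY)] := by
  rfl

theorem A_eq (html : String) : convert_to_mathml html = String.ofList (Flist html.toList) := by
  unfold convert_to_mathml Flist
  rw [items_dict]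
  simp only [List.foldl_cons, List.foldl_nil, PySem.Str.replace, String.toList_ofList]
  rw [replace_eq_rep _ _ _ (by decide), replace_eq_rep _ _ _ (by decide),
      replace_eq_rep _ _ _ (by decide), replace_eq_rep _ _ _ (by decide),
      replace_eq_rep _ _ _ (by decide)]

-- head characterisation: rep keeps a head that is neither the key's start nor the value's start
theorem rep_head (old new : List Char) (_ho : old.head? = some '\'') (hn : new.head? = some '<')
    (x : Char) (hx : x ≠ '<') : ∀ u, (rep old new u).head? = some x → u.head? = some x := by
  intro u
  match u with
  | [] => rw [rep_nil]; intro h; exact absurd h (by simp)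
  | c :: t =>
    by_cases hp : old <+: (c :: t)
    · obtain ⟨w, hw⟩ : ∃ w, new = '<' :: w := by
        cases new with | nil => simp at hn | cons a b => exact ⟨b, by simp at hn; simp [hn]⟩
      rw [rep, if_pos (by simpa [List.isPrefixOf_iff_prefix] using hp), hw]
      intro h
      simp at h
      exact absurd h.symm hx
    · rw [rep_cons_neg _ _ _ _ hp]
      exact fun h => h

-- a singleton prefix is a head fact
theorem singleton_prefix (x : Char) (w : List Char) : [x] <+: w ↔ w.head? = some x := by
  cases w with
  | nil => simp
  | cons a b => simp [List.cons_prefix_cons, eq_comm]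

-- preservation of "does not start with b'" through a rep pass
theorem pres2 (old new : List Char) (ho : old.head? = some '\'') (hn : new.head? = some '<')
    (b : Char) (hb : b ≠ '<') (u : List Char) (h : ¬ [b, '\''] <+: u) :
    ¬ [b, '\''] <+: rep old new u := by
  intro hq
  match u with
  | [] => rw [rep_nil] at hq; simp at hq
  | c :: t =>
    by_cases hp : old <+: (c :: t)
    · obtain ⟨w, hw⟩ : ∃ w, new = '<' :: w := by
        cases new with | nil => simp at hn | cons a b => exact ⟨b, by simp at hn; simp [hn]⟩
      rw [rep, if_pos (by simpa [List.isPrefixOf_iff_prefix] using hp), hw] at hq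
      rw [List.cons_append, List.cons_prefix_cons] at hq
      exact hb hq.1
    · rw [rep_cons_neg _ _ _ _ hp] at hq
      rw [List.cons_prefix_cons] at hq
      obtain ⟨hbc, hq2⟩ := hq
      rw [singleton_prefix] at hq2
      have := rep_head old new ho hn '\'' (by decide) t hq2
      exact h (by rw [List.cons_prefix_cons, singleton_prefix]; exact ⟨hbc, this⟩)

-- preservation of "does not start with b1b2'" through a rep pass
theorem pres3 (old new : List Char) (ho : old.head? = some '\'') (hn : new.head? = some '<')
    (b1 b2 : Char) (hb1 : b1 ≠ '<') (hb2 : b2 ≠ '<') (u : List Char)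
    (h : ¬ [b1, b2, '\''] <+: u) : ¬ [b1, b2, '\''] <+: rep old new u := by
  intro hq
  match u with
  | [] => rw [rep_nil] at hq; simp at hq
  | c :: t =>
    by_cases hp : old <+: (c :: t)
    · obtain ⟨w, hw⟩ : ∃ w, new = '<' :: w := by
        cases new with | nil => simp at hn | cons a b => exact ⟨b, by simp at hn; simp [hn]⟩
      rw [rep, if_pos (by simpa [List.isPrefixOf_iff_prefix] using hp), hw] at hq
      rw [List.cons_append, List.cons_prefix_cons] at hq
      exact hb1 hq.1
    · rw [rep_cons_neg _ _ _ _ hp] at hq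
      rw [List.cons_prefix_cons] at hq
      obtain ⟨hbc, hq2⟩ := hq
      have h2 : ¬ [b2, '\''] <+: t := by
        intro h2; exact h (by rw [List.cons_prefix_cons]; exact ⟨hbc, h2⟩)
      exact pres2 old new ho hn b2 hb2 t h2 hq2

-- rep passes over a quote-free block unchanged
theorem pass_v (old new : List Char) (ho : old.head? = some '\'') :
    ∀ (v u : List Char), (∀ c ∈ v, c ≠ '\'') → rep old new (v ++ u) = v ++ rep old new u := by
  intro v
  induction v with
  | nil => intro u _; simp
  | cons c v' ih =>
    intro u hv
    rw [List.cons_append, rep_cons_neg _ _ _ _ (by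
      intro hpre
      obtain ⟨o', ho'⟩ : ∃ o', old = '\'' :: o' := by
        cases old with | nil => simp at ho | cons a b => exact ⟨b, by simp at ho; simp [ho]⟩
      rw [ho', List.cons_prefix_cons] at hpre
      exact hv c (by simp) hpre.1.symm)]
    rw [ih u (fun c hc => hv c (by simp [hc]))]; simp

-- rep passes over a foreign 3-character key '\''::b::'\''
theorem pass_k3 (old new : List Char) (o' : List Char) (ho : old = '\'' :: o') (b : Char)
    (hb : b ≠ '\'') (u : List Char) (h0 : ¬ old <+: ('\'' :: b :: '\'' :: u))
    (h2 : ¬ o' <+: u) :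
    rep old new ('\'' :: b :: '\'' :: u) = '\'' :: b :: '\'' :: rep old new u := by
  rw [rep_cons_neg _ _ _ _ h0]
  rw [rep_cons_neg _ _ _ _ (by rw [ho]; rw [List.cons_prefix_cons]; rintro ⟨h, -⟩; exact hb h.symm)]
  rw [rep_cons_neg _ _ _ _ (by rw [ho]; rw [List.cons_prefix_cons]; rintro ⟨-, h⟩; exact h2 h)]

-- rep passes over a foreign 4-character key '\''::b1::b2::'\''
theorem pass_k4 (old new : List Char) (o' : List Char) (ho : old = '\'' :: o') (b1 b2 : Char)
    (hb1 : b1 ≠ '\'') (hb2 : b2 ≠ '\'') (u : List Char)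
    (h0 : ¬ old <+: ('\'' :: b1 :: b2 :: '\'' :: u)) (h3 : ¬ o' <+: u) :
    rep old new ('\'' :: b1 :: b2 :: '\'' :: u) = '\'' :: b1 :: b2 :: '\'' :: rep old new u := by
  rw [rep_cons_neg _ _ _ _ h0]
  rw [rep_cons_neg _ _ _ _ (by rw [ho, List.cons_prefix_cons]; rintro ⟨h, -⟩; exact hb1 h.symm)]
  rw [rep_cons_neg _ _ _ _ (by rw [ho, List.cons_prefix_cons]; rintro ⟨h, -⟩; exact hb2 h.symm)]
  rw [rep_cons_neg _ _ _ _ (by rw [ho, List.cons_prefix_cons]; rintro ⟨-, h⟩; exact h3 h)]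

theorem ka_eq : "'a'".toList = '\'' :: 'a' :: '\'' :: [] := rfl
theorem kp_eq : "'p'".toList = '\'' :: 'p' :: '\'' :: [] := rfl
theorem km_eq : "'m'".toList = '\'' :: 'm' :: '\'' :: [] := rfl
theorem kpx_eq : "'px'".toList = '\'' :: 'p' :: 'x' :: '\'' :: [] := rfl
theorem kpy_eq : "'py'".toList = '\'' :: 'p' :: 'y' :: '\'' :: [] := rfl

theorem scanB_nil : scanB [] = [] := by rw [scanB]

theorem scanB_noq (c : Char) (t : List Char) (hc : ¬ c = '\'') :
    scanB (c :: t) = c :: scanB t := by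
  rw [scanB, if_neg hc]

theorem scanB_px (u : List Char) :
    scanB ('\'' :: 'p' :: 'x' :: '\'' :: u) = pvVPX.toList ++ scanB u := by
  rw [scanB]
  simp [kpx_eq]

theorem scanB_py (u : List Char) :
    scanB ('\'' :: 'p' :: 'y' :: '\'' :: u) = pvVPY.toList ++ scanB u := by
  rw [scanB]
  simp [List.isPrefixOf_iff_prefix, kpx_eq, kpy_eq, List.cons_prefix_cons]

theorem scanB_a (u : List Char) :
    scanB ('\'' :: 'a' :: '\'' :: u) = pvVA.toList ++ scanB u := by
  rw [scanB]
  simp [List.isPrefixOf_iff_prefix, kpx_eq, kpy_eq, ka_eq, List.cons_prefix_cons]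

theorem scanB_p (u : List Char) :
    scanB ('\'' :: 'p' :: '\'' :: u) = pvVP.toList ++ scanB u := by
  rw [scanB]
  simp [List.isPrefixOf_iff_prefix, kpx_eq, kpy_eq, ka_eq, kp_eq, List.cons_prefix_cons]

theorem scanB_m (u : List Char) :
    scanB ('\'' :: 'm' :: '\'' :: u) = pvVM.toList ++ scanB u := by
  rw [scanB]
  simp [List.isPrefixOf_iff_prefix, kpx_eq, kpy_eq, ka_eq, kp_eq, km_eq, List.cons_prefix_cons]

theorem scanB_qnk (t : List Char)
    (hpx : ¬ "'px'".toList <+: ('\'' :: t)) (hpy : ¬ "'py'".toList <+: ('\'' :: t))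
    (ha : ¬ "'a'".toList <+: ('\'' :: t)) (hp : ¬ "'p'".toList <+: ('\'' :: t))
    (hm : ¬ "'m'".toList <+: ('\'' :: t)) :
    scanB ('\'' :: t) = '\'' :: scanB t := by
  rw [scanB]
  simp only [List.isPrefixOf_iff_prefix]
  rw [if_neg hpx, if_neg hpy, if_neg ha, if_neg hp, if_neg hm]
  simp

def NB (cs : List Char) : Prop := ∀ b ∈ pvBadLits, ¬ (b.toList <:+: cs)

theorem NB_mono {t cs : List Char} (h : t <:+ cs) (hnb : NB cs) : NB t :=
  fun b hb hinf => hnb b hb (hinf.trans h.isInfix)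

theorem nb_elim (cs : List Char) (hnb : NB cs) (b : String) (hb : b ∈ pvBadLits)
    (w : List Char) (hw : b.toList ++ w = cs) : False :=
  hnb b hb ⟨[], w, by simpa using hw⟩

set_option maxRecDepth 16384 in
theorem noq_VA : ∀ c ∈ pvVA.toList, c ≠ '\'' := by
  have h : pvVA.toList.all (fun c => c != '\'') = true := by rfl
  simpa [List.all_eq_true] using h
set_option maxRecDepth 16384 in
theorem noq_VP : ∀ c ∈ pvVP.toList, c ≠ '\'' := by
  have h : pvVP.toList.all (fun c => c != '\'') = true := by rfl
  simpa [List.all_eq_true] using h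
set_option maxRecDepth 16384 in
theorem noq_VM : ∀ c ∈ pvVM.toList, c ≠ '\'' := by
  have h : pvVM.toList.all (fun c => c != '\'') = true := by rfl
  simpa [List.all_eq_true] using h
set_option maxRecDepth 16384 in
theorem noq_VPX : ∀ c ∈ pvVPX.toList, c ≠ '\'' := by
  have h : pvVPX.toList.all (fun c => c != '\'') = true := by rfl
  simpa [List.all_eq_true] using h

set_option maxRecDepth 8192 in
theorem main_lemma : ∀ (n : Nat) (cs : List Char), cs.length ≤ n → NB cs → Flist cs = scanB cs := by
  intro n
  induction n with
  | zero =>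
    intro cs h _
    have : cs = [] := List.eq_nil_of_length_eq_zero (Nat.le_zero.mp h)
    subst this
    simp [Flist, rep_nil, scanB_nil]
  | succ n ih =>
    intro cs hlen hnb
    match cs with
    | [] => simp [Flist, rep_nil, scanB_nil]
    | c :: t =>
      by_cases hq : c = '\''
      · subst hq
        by_cases hpx : "'px'".toList <+: ('\'' :: t)
        · -- token 'px'
          obtain ⟨u, hu⟩ := hpx
          rw [kpx_eq] at hu
          simp only [List.cons_append] at hu
          have ht : t = 'p' :: 'x' :: '\'' :: u := by
            have := hu
            simp at this
            exact this.symm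
          subst ht
          have sA : ¬ ['a', '\''] <+: u := by
            rintro ⟨w, hw⟩
            exact nb_elim _ hnb "'px'a'" (by simp [pvBadLits]) w (by simp [← hw])
          have sP : ¬ ['p', '\''] <+: u := by
            rintro ⟨w, hw⟩
            exact nb_elim _ hnb "'px'p'" (by simp [pvBadLits]) w (by simp [← hw])
          have sM : ¬ ['m', '\''] <+: u := by
            rintro ⟨w, hw⟩
            exact nb_elim _ hnb "'px'm'" (by simp [pvBadLits]) w (by simp [← hw])
          have e1 := pass_k4 "'a'".toList pvVA.toList ['a', '\''] ka_eq 'p' 'x'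
            (by decide) (by decide) u (by simp [ka_eq, List.cons_prefix_cons]) sA
          have e2 := pass_k4 "'p'".toList pvVP.toList ['p', '\''] kp_eq 'p' 'x'
            (by decide) (by decide) (rep "'a'".toList pvVA.toList u)
            (by simp [kp_eq, List.cons_prefix_cons])
            (pres2 "'a'".toList pvVA.toList rfl rfl 'p' (by decide) u sP)
          have e3 := pass_k4 "'m'".toList pvVM.toList ['m', '\''] km_eq 'p' 'x'
            (by decide) (by decide) (rep "'p'".toList pvVP.toList (rep "'a'".toList pvVA.toList u))
            (by simp [km_eq, List.cons_prefix_cons])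
            (pres2 "'p'".toList pvVP.toList rfl rfl 'm' (by decide) _
              (pres2 "'a'".toList pvVA.toList rfl rfl 'm' (by decide) u sM))
          have e4 : rep "'px'".toList pvVPX.toList
              ('\'' :: 'p' :: 'x' :: '\'' ::
                (rep "'m'".toList pvVM.toList (rep "'p'".toList pvVP.toList (rep "'a'".toList pvVA.toList u))))
              = pvVPX.toList ++ rep "'px'".toList pvVPX.toList
                  (rep "'m'".toList pvVM.toList (rep "'p'".toList pvVP.toList (rep "'a'".toList pvVA.toList u))) :=
            rep_key ['p', 'x', '\''] pvVPX.toList _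
          have e5 := pass_v "'py'".toList pvVPY.toList rfl pvVPX.toList
            (rep "'px'".toList pvVPX.toList
              (rep "'m'".toList pvVM.toList (rep "'p'".toList pvVP.toList (rep "'a'".toList pvVA.toList u))))
            noq_VPX
          have ihu := ih u (by simp at hlen; omega)
            (NB_mono ⟨['\'', 'p', 'x', '\''], rfl⟩ hnb)
          rw [show Flist ('\'' :: 'p' :: 'x' :: '\'' :: u) =
              pvVPX.toList ++ Flist u by unfold Flist; rw [e1, e2, e3, e4, e5]]
          rw [scanB_px, ihu]
        · by_cases hpy : "'py'".toList <+: ('\'' :: t)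
          · -- token 'py'
            obtain ⟨u, hu⟩ := hpy
            rw [kpy_eq] at hu
            simp only [List.cons_append] at hu
            have ht : t = 'p' :: 'y' :: '\'' :: u := by
              have := hu; simp at this; exact this.symm
            subst ht
            have sA : ¬ ['a', '\''] <+: u := by
              rintro ⟨w, hw⟩
              exact nb_elim _ hnb "'py'a'" (by simp [pvBadLits]) w (by simp [← hw])
            have sP : ¬ ['p', '\''] <+: u := by
              rintro ⟨w, hw⟩
              exact nb_elim _ hnb "'py'p'" (by simp [pvBadLits]) w (by simp [← hw])
            have sM : ¬ ['m', '\''] <+: u := by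
              rintro ⟨w, hw⟩
              exact nb_elim _ hnb "'py'm'" (by simp [pvBadLits]) w (by simp [← hw])
            have sPX : ¬ ['p', 'x', '\''] <+: u := by
              rintro ⟨w, hw⟩
              exact nb_elim _ hnb "'py'px'" (by simp [pvBadLits]) w (by simp [← hw])
            have e1 := pass_k4 "'a'".toList pvVA.toList ['a', '\''] ka_eq 'p' 'y'
              (by decide) (by decide) u (by simp [ka_eq, List.cons_prefix_cons]) sA
            have e2 := pass_k4 "'p'".toList pvVP.toList ['p', '\''] kp_eq 'p' 'y'
              (by decide) (by decide) (rep "'a'".toList pvVA.toList u)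
              (by simp [kp_eq, List.cons_prefix_cons])
              (pres2 "'a'".toList pvVA.toList rfl rfl 'p' (by decide) u sP)
            have e3 := pass_k4 "'m'".toList pvVM.toList ['m', '\''] km_eq 'p' 'y'
              (by decide) (by decide) (rep "'p'".toList pvVP.toList (rep "'a'".toList pvVA.toList u))
              (by simp [km_eq, List.cons_prefix_cons])
              (pres2 "'p'".toList pvVP.toList rfl rfl 'm' (by decide) _
                (pres2 "'a'".toList pvVA.toList rfl rfl 'm' (by decide) u sM))
            have e4 := pass_k4 "'px'".toList pvVPX.toList ['p', 'x', '\''] kpx_eq 'p' 'y'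
              (by decide) (by decide)
              (rep "'m'".toList pvVM.toList (rep "'p'".toList pvVP.toList (rep "'a'".toList pvVA.toList u)))
              (by simp [kpx_eq, List.cons_prefix_cons])
              (pres3 "'m'".toList pvVM.toList rfl rfl 'p' 'x' (by decide) (by decide) _
                (pres3 "'p'".toList pvVP.toList rfl rfl 'p' 'x' (by decide) (by decide) _
                  (pres3 "'a'".toList pvVA.toList rfl rfl 'p' 'x' (by decide) (by decide) u sPX)))
            have e5 : rep "'py'".toList pvVPY.toList ('\'' :: 'p' :: 'y' :: '\'' ::
                (rep "'px'".toList pvVPX.toList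
                  (rep "'m'".toList pvVM.toList (rep "'p'".toList pvVP.toList (rep "'a'".toList pvVA.toList u)))))
                = pvVPY.toList ++ rep "'py'".toList pvVPY.toList
                  (rep "'px'".toList pvVPX.toList
                    (rep "'m'".toList pvVM.toList (rep "'p'".toList pvVP.toList (rep "'a'".toList pvVA.toList u)))) :=
              rep_key ['p', 'y', '\''] pvVPY.toList _
            have ihu := ih u (by simp at hlen; omega)
              (NB_mono ⟨['\'', 'p', 'y', '\''], rfl⟩ hnb)
            rw [show Flist ('\'' :: 'p' :: 'y' :: '\'' :: u) =
                pvVPY.toList ++ Flist u by unfold Flist; rw [e1, e2, e3, e4, e5]]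
            rw [scanB_py, ihu]
          · by_cases ha : "'a'".toList <+: ('\'' :: t)
            · -- token 'a'
              obtain ⟨u, hu⟩ := ha
              rw [ka_eq] at hu
              simp only [List.cons_append] at hu
              have ht : t = 'a' :: '\'' :: u := by
                have := hu; simp at this; exact this.symm
              subst ht
              have e1 : rep "'a'".toList pvVA.toList ('\'' :: 'a' :: '\'' :: u)
                  = pvVA.toList ++ rep "'a'".toList pvVA.toList u :=
                rep_key ['a', '\''] pvVA.toList u
              have e2 := pass_v "'p'".toList pvVP.toList rfl pvVA.toList
                (rep "'a'".toList pvVA.toList u) noq_VA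
              have e3 := pass_v "'m'".toList pvVM.toList rfl pvVA.toList
                (rep "'p'".toList pvVP.toList (rep "'a'".toList pvVA.toList u)) noq_VA
              have e4 := pass_v "'px'".toList pvVPX.toList rfl pvVA.toList
                (rep "'m'".toList pvVM.toList (rep "'p'".toList pvVP.toList (rep "'a'".toList pvVA.toList u))) noq_VA
              have e5 := pass_v "'py'".toList pvVPY.toList rfl pvVA.toList
                (rep "'px'".toList pvVPX.toList
                  (rep "'m'".toList pvVM.toList (rep "'p'".toList pvVP.toList (rep "'a'".toList pvVA.toList u)))) noq_VA
              have ihu := ih u (by simp at hlen; omega)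
                (NB_mono ⟨['\'', 'a', '\''], rfl⟩ hnb)
              rw [show Flist ('\'' :: 'a' :: '\'' :: u) =
                  pvVA.toList ++ Flist u by unfold Flist; rw [e1, e2, e3, e4, e5]]
              rw [scanB_a, ihu]
            · by_cases hp : "'p'".toList <+: ('\'' :: t)
              · -- token 'p'
                obtain ⟨u, hu⟩ := hp
                rw [kp_eq] at hu
                simp only [List.cons_append] at hu
                have ht : t = 'p' :: '\'' :: u := by
                  have := hu; simp at this; exact this.symm
                subst ht
                have sA : ¬ ['a', '\''] <+: u := by
                  rintro ⟨w, hw⟩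
                  exact nb_elim _ hnb "'p'a'" (by simp [pvBadLits]) w (by simp [← hw])
                have e1 := pass_k3 "'a'".toList pvVA.toList ['a', '\''] ka_eq 'p'
                  (by decide) u (by simp [ka_eq, List.cons_prefix_cons]) sA
                have e2 : rep "'p'".toList pvVP.toList ('\'' :: 'p' :: '\'' :: rep "'a'".toList pvVA.toList u)
                    = pvVP.toList ++ rep "'p'".toList pvVP.toList (rep "'a'".toList pvVA.toList u) :=
                  rep_key ['p', '\''] pvVP.toList _
                have e3 := pass_v "'m'".toList pvVM.toList rfl pvVP.toList
                  (rep "'p'".toList pvVP.toList (rep "'a'".toList pvVA.toList u)) noq_VP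
                have e4 := pass_v "'px'".toList pvVPX.toList rfl pvVP.toList
                  (rep "'m'".toList pvVM.toList (rep "'p'".toList pvVP.toList (rep "'a'".toList pvVA.toList u))) noq_VP
                have e5 := pass_v "'py'".toList pvVPY.toList rfl pvVP.toList
                  (rep "'px'".toList pvVPX.toList
                    (rep "'m'".toList pvVM.toList (rep "'p'".toList pvVP.toList (rep "'a'".toList pvVA.toList u)))) noq_VP
                have ihu := ih u (by simp at hlen; omega)
                  (NB_mono ⟨['\'', 'p', '\''], rfl⟩ hnb)
                rw [show Flist ('\'' :: 'p' :: '\'' :: u) =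
                    pvVP.toList ++ Flist u by unfold Flist; rw [e1, e2, e3, e4, e5]]
                rw [scanB_p, ihu]
              · by_cases hm : "'m'".toList <+: ('\'' :: t)
                · -- token 'm'
                  obtain ⟨u, hu⟩ := hm
                  rw [km_eq] at hu
                  simp only [List.cons_append] at hu
                  have ht : t = 'm' :: '\'' :: u := by
                    have := hu; simp at this; exact this.symm
                  subst ht
                  have sA : ¬ ['a', '\''] <+: u := by
                    rintro ⟨w, hw⟩
                    exact nb_elim _ hnb "'m'a'" (by simp [pvBadLits]) w (by simp [← hw])
                  have sP : ¬ ['p', '\''] <+: u := by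
                    rintro ⟨w, hw⟩
                    exact nb_elim _ hnb "'m'p'" (by simp [pvBadLits]) w (by simp [← hw])
                  have e1 := pass_k3 "'a'".toList pvVA.toList ['a', '\''] ka_eq 'm'
                    (by decide) u (by simp [ka_eq, List.cons_prefix_cons]) sA
                  have e2 := pass_k3 "'p'".toList pvVP.toList ['p', '\''] kp_eq 'm'
                    (by decide) (rep "'a'".toList pvVA.toList u)
                    (by simp [kp_eq, List.cons_prefix_cons])
                    (pres2 "'a'".toList pvVA.toList rfl rfl 'p' (by decide) u sP)
                  have e3 : rep "'m'".toList pvVM.toList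
                      ('\'' :: 'm' :: '\'' :: rep "'p'".toList pvVP.toList (rep "'a'".toList pvVA.toList u))
                      = pvVM.toList ++ rep "'m'".toList pvVM.toList
                        (rep "'p'".toList pvVP.toList (rep "'a'".toList pvVA.toList u)) :=
                    rep_key ['m', '\''] pvVM.toList _
                  have e4 := pass_v "'px'".toList pvVPX.toList rfl pvVM.toList
                    (rep "'m'".toList pvVM.toList (rep "'p'".toList pvVP.toList (rep "'a'".toList pvVA.toList u))) noq_VM
                  have e5 := pass_v "'py'".toList pvVPY.toList rfl pvVM.toList
                    (rep "'px'".toList pvVPX.toList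
                      (rep "'m'".toList pvVM.toList (rep "'p'".toList pvVP.toList (rep "'a'".toList pvVA.toList u)))) noq_VM
                  have ihu := ih u (by simp at hlen; omega)
                    (NB_mono ⟨['\'', 'm', '\''], rfl⟩ hnb)
                  rw [show Flist ('\'' :: 'm' :: '\'' :: u) =
                      pvVM.toList ++ Flist u by unfold Flist; rw [e1, e2, e3, e4, e5]]
                  rw [scanB_m, ihu]
                · -- a quote that starts no token
                  have sA : ¬ ['a', '\''] <+: t := fun h =>
                    ha (by rw [ka_eq, List.cons_prefix_cons]; exact ⟨rfl, h⟩)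
                  have sP : ¬ ['p', '\''] <+: t := fun h =>
                    hp (by rw [kp_eq, List.cons_prefix_cons]; exact ⟨rfl, h⟩)
                  have sM : ¬ ['m', '\''] <+: t := fun h =>
                    hm (by rw [km_eq, List.cons_prefix_cons]; exact ⟨rfl, h⟩)
                  have sPX : ¬ ['p', 'x', '\''] <+: t := fun h =>
                    hpx (by rw [kpx_eq, List.cons_prefix_cons]; exact ⟨rfl, h⟩)
                  have sPY : ¬ ['p', 'y', '\''] <+: t := fun h =>
                    hpy (by rw [kpy_eq, List.cons_prefix_cons]; exact ⟨rfl, h⟩)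
                  have f1 := rep_cons_neg "'a'".toList pvVA.toList '\'' t
                    (by rw [ka_eq, List.cons_prefix_cons]; rintro ⟨-, h⟩; exact sA h)
                  have f2 := rep_cons_neg "'p'".toList pvVP.toList '\'' (rep "'a'".toList pvVA.toList t)
                    (by rw [kp_eq, List.cons_prefix_cons]; rintro ⟨-, h⟩
                        exact pres2 "'a'".toList pvVA.toList rfl rfl 'p' (by decide) t sP h)
                  have f3 := rep_cons_neg "'m'".toList pvVM.toList '\''
                    (rep "'p'".toList pvVP.toList (rep "'a'".toList pvVA.toList t))
                    (by rw [km_eq, List.cons_prefix_cons]; rintro ⟨-, h⟩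
                        exact pres2 "'p'".toList pvVP.toList rfl rfl 'm' (by decide) _
                          (pres2 "'a'".toList pvVA.toList rfl rfl 'm' (by decide) t sM) h)
                  have f4 := rep_cons_neg "'px'".toList pvVPX.toList '\''
                    (rep "'m'".toList pvVM.toList (rep "'p'".toList pvVP.toList (rep "'a'".toList pvVA.toList t)))
                    (by rw [kpx_eq, List.cons_prefix_cons]; rintro ⟨-, h⟩
                        exact pres3 "'m'".toList pvVM.toList rfl rfl 'p' 'x' (by decide) (by decide) _
                          (pres3 "'p'".toList pvVP.toList rfl rfl 'p' 'x' (by decide) (by decide) _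
                            (pres3 "'a'".toList pvVA.toList rfl rfl 'p' 'x' (by decide) (by decide) t sPX)) h)
                  have f5 := rep_cons_neg "'py'".toList pvVPY.toList '\''
                    (rep "'px'".toList pvVPX.toList
                      (rep "'m'".toList pvVM.toList (rep "'p'".toList pvVP.toList (rep "'a'".toList pvVA.toList t))))
                    (by rw [kpy_eq, List.cons_prefix_cons]; rintro ⟨-, h⟩
                        exact pres3 "'px'".toList pvVPX.toList rfl rfl 'p' 'y' (by decide) (by decide) _
                          (pres3 "'m'".toList pvVM.toList rfl rfl 'p' 'y' (by decide) (by decide) _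
                            (pres3 "'p'".toList pvVP.toList rfl rfl 'p' 'y' (by decide) (by decide) _
                              (pres3 "'a'".toList pvVA.toList rfl rfl 'p' 'y' (by decide) (by decide) t sPY))) h)
                  have iht := ih t (by simp at hlen; omega) (NB_mono ⟨['\''], rfl⟩ hnb)
                  rw [show Flist ('\'' :: t) = '\'' :: Flist t by unfold Flist; rw [f1, f2, f3, f4, f5]]
                  rw [scanB_qnk t hpx hpy ha hp hm, iht]

      · -- plain character
        have hA : ¬ "'a'".toList <+: (c :: t) := by
          rw [ka_eq, List.cons_prefix_cons]; rintro ⟨h, -⟩; exact hq h.symm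
        have hP : ¬ "'p'".toList <+: (c :: t) := by
          rw [kp_eq, List.cons_prefix_cons]; rintro ⟨h, -⟩; exact hq h.symm
        have hM : ¬ "'m'".toList <+: (c :: t) := by
          rw [km_eq, List.cons_prefix_cons]; rintro ⟨h, -⟩; exact hq h.symm
        have hPX : ¬ "'px'".toList <+: (c :: t) := by
          rw [kpx_eq, List.cons_prefix_cons]; rintro ⟨h, -⟩; exact hq h.symm
        have hPY : ¬ "'py'".toList <+: (c :: t) := by
          rw [kpy_eq, List.cons_prefix_cons]; rintro ⟨h, -⟩; exact hq h.symm
        have f1 := rep_cons_neg "'a'".toList pvVA.toList c t hA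
        have hP2 : ¬ "'p'".toList <+: (c :: rep "'a'".toList pvVA.toList t) := by
          rw [kp_eq, List.cons_prefix_cons]; rintro ⟨h, -⟩; exact hq h.symm
        have f2 := rep_cons_neg "'p'".toList pvVP.toList c _ hP2
        have hM2 : ¬ "'m'".toList <+: (c :: rep "'p'".toList pvVP.toList (rep "'a'".toList pvVA.toList t)) := by
          rw [km_eq, List.cons_prefix_cons]; rintro ⟨h, -⟩; exact hq h.symm
        have f3 := rep_cons_neg "'m'".toList pvVM.toList c _ hM2
        have hPX2 : ¬ "'px'".toList <+: (c :: rep "'m'".toList pvVM.toList (rep "'p'".toList pvVP.toList (rep "'a'".toList pvVA.toList t))) := by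
          rw [kpx_eq, List.cons_prefix_cons]; rintro ⟨h, -⟩; exact hq h.symm
        have f4 := rep_cons_neg "'px'".toList pvVPX.toList c _ hPX2
        have hPY2 : ¬ "'py'".toList <+: (c :: rep "'px'".toList pvVPX.toList (rep "'m'".toList pvVM.toList (rep "'p'".toList pvVP.toList (rep "'a'".toList pvVA.toList t)))) := by
          rw [kpy_eq, List.cons_prefix_cons]; rintro ⟨h, -⟩; exact hq h.symm
        have f5 := rep_cons_neg "'py'".toList pvVPY.toList c _ hPY2
        have iht := ih t (by simp at hlen; omega) (NB_mono ⟨[c], rfl⟩ hnb)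
        rw [show Flist (c :: t) = c :: Flist t by unfold Flist; rw [f1, f2, f3, f4, f5]]
        rw [scanB_noq c t hq, iht]

-- ===== VERDICT (by name: the statement is the Claim_ definition above) =====
theorem convert_to_mathml_spec : Claim_equal_convert_to_mathml := by
  intro html _ hpre
  unfold Spec_convert_to_mathml
  rw [A_eq]
  unfold convert_to_mathml_alt
  congr 1
  apply main_lemma html.toList.length _ le_rfl
  intro b hb hinf
  exact absurd ((PySem.Str.isIn_iff_infix b html).mpr hinf) (by simpa using hpre b hb)
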